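-- pv_equiv track=rewrite | github.com/TableCheck-Labs/codeartifact-shield | src/codeartifact_shield/drift.py | _resolve_transitive_key
-- ===== SOURCE A (Python) =====
-- from typing import Any
--
-- def _resolve_transitive_key(parent_key: str, child: str, lock_pkgs: dict[str, Any]) -> str | None:
--     """Replicate npm's resolution: walk up every ``node_modules`` ancestor.
--
--     For a parent at ``node_modules/A/node_modules/B/node_modules/C``, the
--     candidate paths for child ``X`` are, in order:
--
--         node_modules/A/node_modules/B/node_modules/C/node_modules/X
--         node_modules/A/node_modules/B/node_modules/X
--         node_modules/A/node_modules/X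
--         node_modules/X
--
--     The first hit wins. A workspace parent (``parent_key == ""``) looks only at
--     the top level.
--     """
--     root_candidate = f"node_modules/{child}"
--     if not parent_key:
--         return root_candidate if root_candidate in lock_pkgs else None
--
--     # Walk from deepest to one-level-above-root by stripping ``/node_modules/<seg>``
--     # suffixes. The leading ``node_modules/`` at the start of parent_key doesn't
--     # have a preceding slash, so it isn't matched by rfind — we fall back to the
--     # root candidate after the loop.
--     base = parent_key
--     while True:
--         candidate = f"{base}/node_modules/{child}"
--         if candidate in lock_pkgs:
--             return candidate
--         idx = base.rfind("/node_modules/")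
--         if idx == -1:
--             break
--         base = base[:idx]
--     return root_candidate if root_candidate in lock_pkgs else None
-- ===== SOURCE B (Python) =====
-- def _resolve_transitive_key(parent_key: str, child: str, lock_pkgs) -> str | None:
--     """Inverted lookup: instead of probing candidate keys against lock_pkgs one by
--     one, scan lock_pkgs ONCE and select the deepest key that is a valid candidate
--     (an ancestor base + '/node_modules/' + child), falling back to the root
--     candidate; the ancestor bases are precomputed from parent_key."""
--     sep = "/node_modules/"
--     suffix = sep + child
--     root = "node_modules/" + child
--     bases = []
--     if parent_key:
--         parts = parent_key.rsplit(sep)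
--         bases = [sep.join(parts[:i]) for i in range(len(parts), 0, -1)]
--     best = None
--     root_hit = False
--     for key in lock_pkgs:
--         if key == root:
--             root_hit = True
--         elif key.endswith(suffix) and key[: len(key) - len(suffix)] in bases:
--             if best is None or len(key) > len(best):
--                 best = key
--     return best if best is not None else (root if root_hit else None)
-- ===== Notes on version B (the rewrite author's own statement) =====
-- stated objective: alternative
-- what changed: B inverts the lookup direction: it precomputes the ancestor base prefixes of parent_key once, then makes a single pass over lock_pkgs selecting the deepest (longest) key that is a valid candidate (base + '/node_modules/' + child), with the root candidate as fallback, instead of A's while-loop that probes candidate keys against the dict one by one from deepest to shallowest.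
import Mathlib
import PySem

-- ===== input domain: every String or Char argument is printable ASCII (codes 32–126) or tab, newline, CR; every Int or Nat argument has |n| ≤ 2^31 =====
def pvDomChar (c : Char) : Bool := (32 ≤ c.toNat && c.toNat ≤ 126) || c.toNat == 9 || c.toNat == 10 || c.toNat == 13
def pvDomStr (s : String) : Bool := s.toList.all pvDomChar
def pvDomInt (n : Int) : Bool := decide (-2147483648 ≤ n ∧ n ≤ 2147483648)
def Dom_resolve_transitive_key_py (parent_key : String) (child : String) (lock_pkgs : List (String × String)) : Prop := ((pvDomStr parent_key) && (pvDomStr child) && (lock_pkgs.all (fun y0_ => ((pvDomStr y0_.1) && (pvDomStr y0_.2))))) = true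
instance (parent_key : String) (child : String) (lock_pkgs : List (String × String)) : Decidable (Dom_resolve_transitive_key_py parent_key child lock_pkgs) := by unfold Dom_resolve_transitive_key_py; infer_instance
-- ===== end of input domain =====

-- B inverts the lookup direction: instead of A's walk that probes candidate keys
-- against the dict one by one, B scans lock_pkgs once and selects the deepest
-- (longest) key that is a valid candidate (objective: alternative algorithm).

-- shared string constants: "/node_modules/" and "node_modules/"
def pvSep : List Char := ['/', 'n', 'o', 'd', 'e', '_', 'm', 'o', 'd', 'u', 'l', 'e', 's', '/']
def pvRootPfx : List Char := ['n', 'o', 'd', 'e', '_', 'm', 'o', 'd', 'u', 'l', 'e', 's', '/']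
-- `cand in lock_pkgs` : key membership in the Python dict
def pvMem (lock_pkgs : List (String × String)) (cand : List Char) : Bool :=
  lock_pkgs.any (fun p => p.1.toList == cand)

-- termination support for the ports' recursion on `base[:idx]` (idx = base.rfind("/node_modules/") ≠ -1):
-- a successful rfind is a Nat index at which pvSep occurs, at least pvSep.length before the end
theorem pvGo_spec (s : List Char) (k : Nat) (h : ¬ PySem.Chars.rfind.go s pvSep k = -1) :
    ∃ j : Nat, PySem.Chars.rfind.go s pvSep k = (j : Int) ∧ j ≤ k ∧
      pvSep.isPrefixOf (s.drop j) = true := by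
  induction k with
  | zero =>
    rw [PySem.Chars.rfind.go] at h ⊢
    split at h
    · exact ⟨0, by simp_all⟩
    · simp at h
  | succ m ih =>
    rw [PySem.Chars.rfind.go] at h ⊢
    split at h
    · next hp => exact ⟨m + 1, by simp [hp], le_refl _, hp⟩
    · next hp =>
      obtain ⟨j, h1, h2, h3⟩ := ih h
      exact ⟨j, by simp [hp, h1], Nat.le_succ_of_le h2, h3⟩

theorem pvRfind_find (s : List Char) (h : ¬ PySem.Chars.rfind s pvSep = -1) :
    ∃ j : Nat, PySem.Chars.rfind s pvSep = (j : Int) ∧ j + 14 ≤ s.length ∧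
      pvSep.isPrefixOf (s.drop j) = true := by
  rw [PySem.Chars.rfind] at h ⊢
  obtain ⟨j, h1, h2, h3⟩ := pvGo_spec s s.length h
  refine ⟨j, h1, ?_, h3⟩
  have := (List.isPrefixOf_iff_prefix.mp h3).length_le
  simp [List.length_drop] at this
  have : pvSep.length = 14 := by decide
  omega

theorem pvSlice_lt (s : List Char) (h : ¬ PySem.Chars.rfind s pvSep = -1) :
    (PySem.List.slice s none (some (PySem.Chars.rfind s pvSep))).length < s.length := by
  obtain ⟨j, hj, hlen, -⟩ := pvRfind_find s h
  rw [hj, PySem.List.slice_to s (by exact_mod_cast Nat.zero_le j)]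
  simp only [Int.toNat_natCast, List.length_take]
  omega

-- ===== PORT A =====
-- the `while True` walk: check candidate, then strip the rightmost "/node_modules/<seg>"
def pvAloop (child : List Char) (lock_pkgs : List (String × String)) (base : List Char) :
    Option (List Char) :=
  let cand := base ++ pvSep ++ child
  if pvMem lock_pkgs cand then some cand
  else
    if h : PySem.Chars.rfind base pvSep = -1 then none
    else
      have := pvSlice_lt base h
      pvAloop child lock_pkgs (PySem.List.slice base none (some (PySem.Chars.rfind base pvSep)))
termination_by base.length

def resolve_transitive_key_py (parent_key : String) (child : String) (lock_pkgs : List (String × String)) : Option String :=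
  let root := pvRootPfx ++ child.toList
  if parent_key.toList = [] then
    if pvMem lock_pkgs root then some (String.ofList root) else none
  else
    match pvAloop child.toList lock_pkgs parent_key.toList with
    | some c => some (String.ofList c)
    | none => if pvMem lock_pkgs root then some (String.ofList root) else none

-- ===== PORT B =====
-- hand port of str.rsplit("/node_modules/") (no PySem primitive): split at the rightmost
-- occurrence, recurse on the left part; exact Python semantics (14 = len("/node_modules/"))
def pvRsplit (s : List Char) : List (List Char) :=
  if h : PySem.Chars.rfind s pvSep = -1 then [s]
  else
    have := pvSlice_lt s h
    pvRsplit (PySem.List.slice s none (some (PySem.Chars.rfind s pvSep))) ++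
      [PySem.List.slice s (some (PySem.Chars.rfind s pvSep + 14)) none]
termination_by s.length

-- Source B: `bases = [] ; if parent_key: bases = [sep.join(parts[:i]) for i in range(len(parts), 0, -1)]`
def pvBasesB (pk : List Char) : List (List Char) :=
  if pk = [] then []
  else (PySem.List.pyRange ((pvRsplit pk).length : Int) 0 (-1)).map
    (fun i => PySem.Chars.join pvSep (PySem.List.slice (pvRsplit pk) none (some i)))

-- Source B loop body: record the root hit, else update `best` with a deeper valid candidate
def pvStep (root suffix : List Char) (bases : List (List Char))
    (st : Option (List Char) × Bool) (key : List Char) : Option (List Char) × Bool :=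
  if key = root then (st.1, true)
  else if PySem.Chars.endswith key suffix = true ∧
      PySem.List.slice key none (some ((key.length : Int) - (suffix.length : Int))) ∈ bases then
    match st.1 with
    | none => (some key, st.2)
    | some b => if b.length < key.length then (some key, st.2) else st
  else st

def resolve_transitive_key_py_alt (parent_key : String) (child : String) (lock_pkgs : List (String × String)) : Option String :=
  let suffix := pvSep ++ child.toList
  let root := pvRootPfx ++ child.toList
  let bases := pvBasesB parent_key.toList
  let st := lock_pkgs.foldl (fun st kv => pvStep root suffix bases st kv.1.toList) (none, false)
  match st.1 with
  | some b => some (String.ofList b)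
  | none => if st.2 then some (String.ofList root) else none

-- ===== PRECONDITION & SPEC =====
def Spec_resolve_transitive_key_py (parent_key : String) (child : String) (lock_pkgs : List (String × String)) (out : Option String) : Prop := out = resolve_transitive_key_py_alt parent_key child lock_pkgs
instance (parent_key : String) (child : String) (lock_pkgs : List (String × String)) (out : Option String) : Decidable (Spec_resolve_transitive_key_py parent_key child lock_pkgs out) := by unfold Spec_resolve_transitive_key_py; infer_instance

-- ===== CLAIM (what is proved, stated in full; the proofs are below) =====
def Claim_equal_resolve_transitive_key_py : Prop := ∀ (parent_key : String) (child : String) (lock_pkgs : List (String × String)), Dom_resolve_transitive_key_py parent_key child lock_pkgs → Spec_resolve_transitive_key_py parent_key child lock_pkgs (resolve_transitive_key_py parent_key child lock_pkgs)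

-- ===== LEMMAS AND PROOFS =====

-- A's candidate sequence (walk order, deepest first), as a function of the base string
def pvCands (child : List Char) (s : List Char) : List (List Char) :=
  (PySem.List.pyRange ((pvRsplit s).length : Int) 0 (-1)).map
    (fun i => PySem.Chars.join pvSep (PySem.List.slice (pvRsplit s) none (some i)) ++ pvSep ++ child)

theorem pvRsplit_ne_nil (s : List Char) : pvRsplit s ≠ [] := by
  rw [pvRsplit]; split <;> simp

theorem pvJoin_snoc (xs : List (List Char)) (y : List Char) (h : xs ≠ []) :
    PySem.Chars.join pvSep (xs ++ [y]) = PySem.Chars.join pvSep xs ++ pvSep ++ y := by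
  induction xs with
  | nil => simp at h
  | cons a t ih =>
    cases t with
    | nil => simp [PySem.Chars.join, List.intercalate]
    | cons b u =>
      have := ih (by simp)
      simp only [PySem.Chars.join, List.intercalate] at this ⊢
      simp [List.intersperse] at this ⊢
      simp_all

theorem pvJoin_rsplit (s : List Char) : PySem.Chars.join pvSep (pvRsplit s) = s := by
  induction s using pvRsplit.induct with
  | case1 s h => rw [pvRsplit]; simp [h, PySem.Chars.join, List.intercalate]
  | case2 s h hlt ih =>
    rw [pvRsplit, dif_neg h, pvJoin_snoc _ _ (pvRsplit_ne_nil _), ih]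
    obtain ⟨j, hj, hlen, hpre⟩ := pvRfind_find s h
    rw [hj, PySem.List.slice_to s (by exact_mod_cast Nat.zero_le j),
        PySem.List.slice_from s (a := (j : Int) + 14) (by omega)]
    have hdrop : s.drop j = pvSep ++ s.drop (j + 14) := by
      obtain ⟨t, ht⟩ := List.isPrefixOf_iff_prefix.mp hpre
      have h2 : s.drop (j + 14) = t := by
        have : s.drop (j + 14) = (s.drop j).drop 14 := by
          rw [List.drop_drop]
        rw [this, ← ht]
        have hsep : pvSep.length = 14 := rfl
        rw [← hsep, List.drop_left]
      rw [h2, ← ht]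
    have : ((j : Int) + 14).toNat = j + 14 := by omega
    rw [this]
    calc List.take j s ++ pvSep ++ List.drop (j + 14) s
        = List.take j s ++ (pvSep ++ List.drop (j + 14) s) := by simp [List.append_assoc]
      _ = List.take j s ++ List.drop j s := by rw [← hdrop]
      _ = s := List.take_append_drop j s

theorem pvRange_down (n : Nat) :
    PySem.List.pyRange (n : Int) 0 (-1) = (List.range n).map (fun k => (n : Int) - (Nat.cast k : Int)) := by
  rw [PySem.List.pyRange]
  norm_num
  rcases Nat.eq_zero_or_pos n with h | h
  · subst h
    rfl
  · rw [if_pos h]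
    apply List.map_congr_left
    intro k hk
    ring

theorem pvCands_formula (child s : List Char) :
    pvCands child s = (List.range (pvRsplit s).length).map
      (fun k => PySem.Chars.join pvSep ((pvRsplit s).take ((pvRsplit s).length - k)) ++ pvSep ++ child) := by
  rw [pvCands, pvRange_down, List.map_map]
  apply List.map_congr_left
  intro k hk
  simp only [Function.comp_apply]
  have hk' : k < (pvRsplit s).length := List.mem_range.mp hk
  rw [PySem.List.slice_to _ (by omega)]
  have ht : (((pvRsplit s).length : Int) - (Nat.cast k : Int)).toNat = (pvRsplit s).length - k := by omega
  rw [ht]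

theorem pvCands_neg (child s : List Char) (h : PySem.Chars.rfind s pvSep = -1) :
    pvCands child s = [s ++ pvSep ++ child] := by
  rw [pvCands_formula]
  have : pvRsplit s = [s] := by rw [pvRsplit, dif_pos h]
  rw [this]
  simp [PySem.Chars.join, List.intercalate]

theorem pvCands_pos (child s : List Char) (h : ¬ PySem.Chars.rfind s pvSep = -1) :
    pvCands child s = (s ++ pvSep ++ child) ::
      pvCands child (PySem.List.slice s none (some (PySem.Chars.rfind s pvSep))) := by
  have hsplit : pvRsplit s = pvRsplit (PySem.List.slice s none (some (PySem.Chars.rfind s pvSep))) ++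
      [PySem.List.slice s (some (PySem.Chars.rfind s pvSep + 14)) none] := by
    rw [pvRsplit, dif_neg h]
  rw [pvCands_formula, pvCands_formula, hsplit]
  set rs' := pvRsplit (PySem.List.slice s none (some (PySem.Chars.rfind s pvSep))) with hrs
  set last := PySem.List.slice s (some (PySem.Chars.rfind s pvSep + 14)) none with hlast
  have hlen : (rs' ++ [last]).length = rs'.length + 1 := by simp
  rw [hlen, List.range_succ_eq_map, List.map_cons, List.map_map]
  congr 1
  · have : rs'.length + 1 - 0 = (rs' ++ [last]).length := by simp
    rw [this, List.take_length]
    rw [← hsplit, pvJoin_rsplit]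
  · apply List.map_congr_left
    intro k hk
    have hk' : k < rs'.length := List.mem_range.mp hk
    simp only [Function.comp_apply, Nat.succ_eq_add_one]
    have h1 : rs'.length + 1 - (k + 1) = rs'.length - k := by omega
    rw [h1, List.take_append_of_le_length (by omega)]

theorem pvAloop_eq_find (child : List Char) (lock_pkgs : List (String × String)) (s : List Char) :
    pvAloop child lock_pkgs s = (pvCands child s).find? (fun c => pvMem lock_pkgs c) := by
  induction s using pvRsplit.induct with
  | case1 s h =>
    rw [pvAloop, pvCands_neg child s h]
    simp only [List.append_assoc]
    by_cases hm : pvMem lock_pkgs (s ++ (pvSep ++ child)) <;> simp [hm, h, List.find?]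
  | case2 s h hlt ih =>
    rw [pvAloop, pvCands_pos child s h]
    simp only [List.append_assoc]
    by_cases hm : pvMem lock_pkgs (s ++ (pvSep ++ child))
    · simp [hm, List.find?]
    · rw [List.find?_cons_of_neg (by simp [hm])]
      simp only [hm, dif_neg h]
      exact ih

-- B's bases relate to A's candidates: candidate = base ++ "/node_modules/" ++ child
theorem pvCands_eq_map (child pk : List Char) (h : pk ≠ []) :
    pvCands child pk = (pvBasesB pk).map (fun b => b ++ (pvSep ++ child)) := by
  rw [pvCands, pvBasesB, if_neg h, List.map_map]
  apply List.map_congr_left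
  intro i _
  simp [List.append_assoc]

-- length of a join of a snoc
theorem pvJoin_snoc_len (xs : List (List Char)) (y : List Char) (h : xs ≠ []) :
    (PySem.Chars.join pvSep (xs ++ [y])).length
      = (PySem.Chars.join pvSep xs).length + 14 + y.length := by
  rw [pvJoin_snoc xs y h]
  simp [pvSep]
  omega

-- strict monotonicity of |join(parts[:i])| in i, for 1 ≤ i
theorem pvJoinLen_lt (ps : List (List Char)) (i j : Nat) (h1 : 1 ≤ i) (hij : i < j)
    (hj : j ≤ ps.length) :
    (PySem.Chars.join pvSep (ps.take i)).length < (PySem.Chars.join pvSep (ps.take j)).length := by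
  induction j, hij using Nat.le_induction with
  | base =>
    have hi : i < ps.length := by omega
    have htake : ps.take (i + 1) = ps.take i ++ [ps[i]] := by
      rw [List.take_add_one, List.getElem?_eq_getElem hi]
      rfl
    rw [htake, pvJoin_snoc_len _ _ (by
      have : (ps.take i).length = i := by simp; omega
      intro hnil; rw [hnil] at this; simp at this; omega)]
    omega
  | succ j hij ih =>
    have hlt := ih (by omega)
    have hjlt : j < ps.length := by omega
    have htake : ps.take (j + 1) = ps.take j ++ [ps[j]] := by
      rw [List.take_add_one, List.getElem?_eq_getElem hjlt]
      rfl
    rw [htake, pvJoin_snoc_len _ _ (by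
      have : (ps.take j).length = j := by simp; omega
      intro hnil; rw [hnil] at this; simp at this; omega)]
    omega

-- A's candidate list has strictly decreasing lengths (deepest first)
theorem pvCands_sorted (child pk : List Char) :
    (pvCands child pk).Pairwise (fun a b => b.length < a.length) := by
  rw [pvCands_formula]
  rw [List.pairwise_iff_getElem]
  intro i j hi hj hij
  simp only [List.length_map, List.length_range] at hi hj
  simp only [List.getElem_map, List.getElem_range, List.length_append]
  have h14 : pvSep.length = 14 := rfl
  rw [h14]
  have := pvJoinLen_lt (pvRsplit pk) ((pvRsplit pk).length - j) ((pvRsplit pk).length - i)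
    (by omega) (by omega) (by omega)
  omega

-- the root candidate never coincides with a walk candidate (length mismatch)
theorem pvRoot_not_mem (child pk : List Char) (h : pk ≠ []) :
    pvRootPfx ++ child ∉ pvCands child pk := by
  rw [pvCands_eq_map child pk h]
  intro hmem
  obtain ⟨b, _, heq⟩ := List.mem_map.mp hmem
  have := congrArg List.length heq
  simp [pvRootPfx, pvSep] at this
  omega

-- B's per-key candidacy test characterises membership in A's candidate list
theorem pvMemCands (child pk key : List Char) (h : pk ≠ []) :
    (PySem.Chars.endswith key (pvSep ++ child) = true ∧
      PySem.List.slice key none (some ((key.length : Int) - (((pvSep ++ child).length : Nat) : Int))) ∈ pvBasesB pk)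
    ↔ key ∈ pvCands child pk := by
  rw [pvCands_eq_map child pk h, List.mem_map]
  constructor
  · rintro ⟨he, hs⟩
    rw [PySem.Chars.endswith_iff] at he
    obtain ⟨t, rfl⟩ := he
    refine ⟨t, ?_, rfl⟩
    have hlen : ((t ++ (pvSep ++ child)).length : Int) - (((pvSep ++ child).length : Nat) : Int)
        = (t.length : Int) := by
      simp [List.length_append]
    rw [hlen, PySem.List.slice_to _ (by exact_mod_cast Nat.zero_le _)] at hs
    simpa [List.take_left] using hs
  · rintro ⟨b, hb, rfl⟩
    refine ⟨by rw [PySem.Chars.endswith_iff]; exact ⟨b, rfl⟩, ?_⟩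
    have hlen : ((b ++ (pvSep ++ child)).length : Int) - (((pvSep ++ child).length : Nat) : Int)
        = (b.length : Int) := by
      simp [List.length_append]
    rw [hlen, PySem.List.slice_to _ (by exact_mod_cast Nat.zero_le _)]
    simpa [List.take_left] using hb

-- abstract form of Source B's `best` update: keep the longer candidate
def pvUpd (C : List (List Char)) (b : Option (List Char)) (k : List Char) : Option (List Char) :=
  if k ∈ C then
    match b with
    | none => some k
    | some m => if m.length < k.length then some k else some m
  else b

theorem pvStep_eq (root suffix : List Char) (bases C : List (List Char))
    (hroot : root ∉ C)
    (hmem : ∀ key, (PySem.Chars.endswith key suffix = true ∧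
      PySem.List.slice key none (some ((key.length : Int) - ((suffix.length : Nat) : Int))) ∈ bases) ↔ key ∈ C)
    (st : Option (List Char) × Bool) (key : List Char) :
    pvStep root suffix bases st key = (pvUpd C st.1 key, st.2 || (key == root)) := by
  obtain ⟨b0, r⟩ := st
  unfold pvStep pvUpd
  by_cases hk : key = root
  · subst hk
    simp [hroot]
  · rw [if_neg hk]
    by_cases hc : key ∈ C
    · rw [if_pos ((hmem key).mpr hc), if_pos hc]
      cases b0 with
      | none => simp [hk]
      | some v => by_cases hl : v.length < key.length <;> simp [hk, hl]
    · rw [if_neg (fun hcond => hc ((hmem key).mp hcond)), if_neg hc]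
      simp [hk]

theorem pvFold_step_eq (root suffix : List Char) (bases C : List (List Char))
    (hroot : root ∉ C)
    (hmem : ∀ key, (PySem.Chars.endswith key suffix = true ∧
      PySem.List.slice key none (some ((key.length : Int) - ((suffix.length : Nat) : Int))) ∈ bases) ↔ key ∈ C)
    (L : List (String × String)) :
    ∀ (b : Option (List Char)) (r : Bool),
    L.foldl (fun st kv => pvStep root suffix bases st kv.1.toList) (b, r)
      = (L.foldl (fun b kv => pvUpd C b kv.1.toList) b, r || L.any (fun kv => kv.1.toList == root)) := by
  induction L with
  | nil => intro b r; simp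
  | cons kv t ih =>
    intro b r
    simp only [List.foldl_cons, List.any_cons]
    rw [pvStep_eq root suffix bases C hroot hmem (b, r) kv.1.toList, ih]
    simp [Bool.or_assoc]

-- the fold's result is either the seed or a lock key that is a candidate
theorem pvUpd_none (C : List (List Char)) (k : List Char) :
    pvUpd C none k = if k ∈ C then some k else none := by
  unfold pvUpd; split <;> rfl

theorem pvUpd_some (C : List (List Char)) (x k : List Char) :
    pvUpd C (some x) k
      = if k ∈ C then (if x.length < k.length then some k else some x) else some x := by
  unfold pvUpd; split <;> rfl

theorem pvFold_mem (C : List (List Char)) :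
    ∀ (t : List (String × String)) (b0 : Option (List Char)) (m : List Char),
    t.foldl (fun b kv => pvUpd C b kv.1.toList) b0 = some m →
    b0 = some m ∨ ((∃ kv ∈ t, kv.1.toList = m) ∧ m ∈ C) := by
  intro t
  induction t with
  | nil => intro b0 m h; left; simpa using h
  | cons kv t ih =>
    intro b0 m h
    simp only [List.foldl_cons] at h
    rcases ih _ m h with h1 | ⟨⟨kv', hkv', hm'⟩, hmC⟩
    · cases hb : b0 with
      | none =>
        rw [hb, pvUpd_none] at h1
        by_cases hc : kv.1.toList ∈ C
        · rw [if_pos hc] at h1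
          right
          exact ⟨⟨kv, List.mem_cons_self, Option.some.inj h1⟩, Option.some.inj h1 ▸ hc⟩
        · rw [if_neg hc] at h1; simp at h1
      | some x =>
        rw [hb, pvUpd_some] at h1
        by_cases hc : kv.1.toList ∈ C
        · rw [if_pos hc] at h1
          by_cases hl : x.length < kv.1.toList.length
          · rw [if_pos hl] at h1
            right
            exact ⟨⟨kv, List.mem_cons_self, Option.some.inj h1⟩, Option.some.inj h1 ▸ hc⟩
          · rw [if_neg hl] at h1; left; exact h1
        · rw [if_neg hc] at h1; left; exact h1
    · right
      exact ⟨⟨kv', List.mem_cons_of_mem _ hkv', hm'⟩, hmC⟩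

-- once `best` is set, it only grows in length
theorem pvFold_ge (C : List (List Char)) :
    ∀ (t : List (String × String)) (x : List Char),
    ∃ m, t.foldl (fun b kv => pvUpd C b kv.1.toList) (some x) = some m ∧ x.length ≤ m.length := by
  intro t
  induction t with
  | nil => intro x; exact ⟨x, by simp, le_refl _⟩
  | cons kv t ih =>
    intro x
    simp only [List.foldl_cons]
    have hstep : ∃ y, pvUpd C (some x) kv.1.toList = some y ∧ x.length ≤ y.length := by
      rw [pvUpd_some]
      by_cases hc : kv.1.toList ∈ C
      · rw [if_pos hc]
        by_cases hl : x.length < kv.1.toList.length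
        · rw [if_pos hl]; exact ⟨_, rfl, by omega⟩
        · rw [if_neg hl]; exact ⟨_, rfl, le_refl _⟩
      · rw [if_neg hc]; exact ⟨_, rfl, le_refl _⟩
    obtain ⟨y, hy, hly⟩ := hstep
    rw [hy]
    obtain ⟨m, hm, hym⟩ := ih y
    exact ⟨m, hm, le_trans hly hym⟩

-- a lock key that is a candidate forces a result at least as long
theorem pvFold_hit (C : List (List Char)) :
    ∀ (t : List (String × String)) (b0 : Option (List Char)) (k : List Char),
    (∃ kv ∈ t, kv.1.toList = k) → k ∈ C →
    ∃ m, t.foldl (fun b kv => pvUpd C b kv.1.toList) b0 = some m ∧ k.length ≤ m.length := by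
  intro t
  induction t with
  | nil => rintro b0 k ⟨kv, hkv, _⟩ _; simp at hkv
  | cons a t ih =>
    rintro b0 k ⟨kv, hkv, hk⟩ hC
    simp only [List.foldl_cons]
    rcases List.mem_cons.mp hkv with rfl | hmem
    · subst hk
      have hstep : ∃ y, pvUpd C b0 kv.1.toList = some y ∧ kv.1.toList.length ≤ y.length := by
        cases b0 with
        | none => rw [pvUpd_none, if_pos hC]; exact ⟨_, rfl, le_refl _⟩
        | some x =>
          rw [pvUpd_some, if_pos hC]
          by_cases hl : x.length < kv.1.toList.length
          · rw [if_pos hl]; exact ⟨_, rfl, le_refl _⟩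
          · rw [if_neg hl]; exact ⟨_, rfl, by omega⟩
      obtain ⟨y, hy, hly⟩ := hstep
      rw [hy]
      obtain ⟨m, hm, hym⟩ := pvFold_ge C t y
      exact ⟨m, hm, le_trans hly hym⟩
    · exact ih _ k ⟨kv, hmem, hk⟩ hC

theorem pvMem_iff (lock : List (String × String)) (c : List Char) :
    pvMem lock c = true ↔ ∃ kv ∈ lock, kv.1.toList = c := by
  simp [pvMem, List.any_eq_true]

-- the argmax-by-length fold over the dict equals the first hit of the
-- strictly-length-decreasing candidate list
theorem pvFold_eq_find (C : List (List Char)) (hC : C.Pairwise fun a b => b.length < a.length)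
    (lock : List (String × String)) :
    lock.foldl (fun b kv => pvUpd C b kv.1.toList) none = C.find? (fun c => pvMem lock c) := by
  cases hf : C.find? (fun c => pvMem lock c) with
  | none =>
    have hnone := List.find?_eq_none.mp hf
    cases hr : lock.foldl (fun b kv => pvUpd C b kv.1.toList) none with
    | none => rfl
    | some m =>
      rcases pvFold_mem C lock none m hr with h | ⟨hex, hmC⟩
      · simp at h
      · exact absurd ((pvMem_iff lock m).mpr hex) (hnone m hmC)
  | some c =>
    have hcC : c ∈ C := List.mem_of_find?_eq_some hf
    have hpc : pvMem lock c = true := List.find?_some hf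
    obtain ⟨m, hm, hlen⟩ := pvFold_hit C lock none c ((pvMem_iff lock c).mp hpc) hcC
    rw [hm]
    rcases pvFold_mem C lock none m hm with h | ⟨hex, hmC⟩
    · simp at h
    · obtain ⟨as, bs, hsplit, hfail⟩ := (List.find?_eq_some_iff_append.mp hf).2
      have hmem' : m ∈ as ++ c :: bs := hsplit ▸ hmC
      rcases List.mem_append.mp hmem' with hin | hin
      · have := hfail m hin
        rw [(pvMem_iff lock m).mpr hex] at this
        simp at this
      · rcases List.mem_cons.mp hin with rfl | hin
        · rfl
        · have hpw := hsplit ▸ hC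
          have h2 := (List.pairwise_append.mp hpw).2.1
          have h3 := (List.pairwise_cons.mp h2).1 m hin
          omega

-- ===== VERDICT (by name: the statement is the Claim_ definition above) =====
theorem resolve_transitive_key_py_spec : Claim_equal_resolve_transitive_key_py := by
  intro parent_key child lock_pkgs _
  unfold Spec_resolve_transitive_key_py resolve_transitive_key_py resolve_transitive_key_py_alt
  simp only []
  by_cases hpk : parent_key.toList = []
  · rw [if_pos hpk]
    have hbases : pvBasesB parent_key.toList = [] := by rw [pvBasesB, if_pos hpk]
    rw [hbases]
    rw [pvFold_step_eq (pvRootPfx ++ child.toList) (pvSep ++ child.toList) [] []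
      (by simp) (by intro key; simp) lock_pkgs none false]
    rw [pvFold_eq_find [] (by simp) lock_pkgs]
    simp only [List.find?_nil, Bool.false_or]
    have hany : lock_pkgs.any (fun kv => kv.1.toList == pvRootPfx ++ child.toList)
        = pvMem lock_pkgs (pvRootPfx ++ child.toList) := rfl
    rw [hany]
  · rw [if_neg hpk]
    rw [pvAloop_eq_find]
    rw [pvFold_step_eq (pvRootPfx ++ child.toList) (pvSep ++ child.toList)
      (pvBasesB parent_key.toList) (pvCands child.toList parent_key.toList)
      (pvRoot_not_mem child.toList parent_key.toList hpk)
      (fun key => pvMemCands child.toList parent_key.toList key hpk) lock_pkgs none false]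
    rw [pvFold_eq_find _ (pvCands_sorted child.toList parent_key.toList) lock_pkgs]
    cases hf : (pvCands child.toList parent_key.toList).find? (fun c => pvMem lock_pkgs c) with
    | some c => simp
    | none =>
      simp only [Bool.false_or]
      have hany : lock_pkgs.any (fun kv => kv.1.toList == pvRootPfx ++ child.toList)
          = pvMem lock_pkgs (pvRootPfx ++ child.toList) := rfl
      rw [hany]
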